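-- pv_equiv track=rewrite | github.com/jakeaminia/portfolioRepo | ParkourClubProjects/TreeHeight.py | get_all_prerequisites
-- ===== SOURCE A (Python) =====
-- def get_all_prerequisites(node: str, matrix: dict) -> set:
--     result = set()
--     if not matrix.get(node):
--         return result
--     for prerequisite in matrix.get(node):
--         result.add(prerequisite)
--         for second_order_prerequisite in get_all_prerequisites(prerequisite, matrix):
--             result.add(second_order_prerequisite)
--     return result
-- ===== SOURCE B (Python) =====
-- def get_all_prerequisites(node: str, matrix: dict) -> set:
--     # Iterative DFS over an explicit stack with a visited set: each node is
--     # expanded at most once, instead of A's re-computation of the full closure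
--     # of every prerequisite at every occurrence.  The stack top is the list
--     # end (O(1) pop); children are pushed reversed so the visit order is the
--     # same depth-first, left-to-right order as A's recursion.
--     seen = set()
--     stack = list(matrix.get(node) or [])
--     stack.reverse()
--     while stack:
--         cur = stack.pop()
--         if cur not in seen:
--             seen.add(cur)
--             prereqs = list(matrix.get(cur) or [])
--             prereqs.reverse()
--             stack.extend(prereqs)
--     return seen
-- ===== Notes on version B (the rewrite author's own statement) =====
-- stated objective: alternative
-- what changed: Replaces A's exhaustive recursion, which recomputes the whole closure of a prerequisite at every one of its occurrences, by an iterative explicit-stack DFS with a visited set so that every node is expanded at most once.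
import Mathlib
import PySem

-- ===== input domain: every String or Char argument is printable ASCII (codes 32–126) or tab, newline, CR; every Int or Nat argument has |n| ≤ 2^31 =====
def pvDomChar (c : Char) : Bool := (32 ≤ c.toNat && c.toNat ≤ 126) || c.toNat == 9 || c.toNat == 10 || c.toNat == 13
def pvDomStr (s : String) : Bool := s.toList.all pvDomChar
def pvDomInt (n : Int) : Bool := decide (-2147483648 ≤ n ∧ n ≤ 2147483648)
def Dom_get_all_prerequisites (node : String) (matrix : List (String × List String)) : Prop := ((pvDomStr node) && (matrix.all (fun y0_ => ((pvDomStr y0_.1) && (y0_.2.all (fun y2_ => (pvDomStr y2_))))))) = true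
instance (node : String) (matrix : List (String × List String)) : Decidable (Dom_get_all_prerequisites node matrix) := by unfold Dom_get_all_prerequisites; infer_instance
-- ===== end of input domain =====

-- B replaces A's exhaustive recursion (which recomputes the closure of a prerequisite at
-- every occurrence) by an iterative explicit-stack DFS with a visited set, expanding each
-- node at most once.

-- `matrix.get(k)`; a missing key and an empty list are both falsy, so both mean "no prerequisites"
def pvAdj (matrix : List (String × List String)) (k : String) : List String :=
  ((PySem.Dict.mk matrix).get? k).getD []

-- total number of prerequisite entries (used only as fuel bounds making the ports total)
def pvE (matrix : List (String × List String)) : Nat := (matrix.flatMap (fun kv => kv.2)).length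

-- ===== PORT A =====
-- literal transliteration of A; the recursion is fueled (matrix.length + 1 levels never
-- run out on inputs admitted by Pre_, where no cycle is reachable from `node`)
def pvCloA (matrix : List (String × List String)) : Nat → String → PySem.Set String
  | 0, _ => PySem.Set.empty
  | n + 1, node =>
    let pr := pvAdj matrix node
    if pr = [] then PySem.Set.empty
    else
      pr.foldl (fun result p =>
        (pvCloA matrix n p).foldl (fun r q => PySem.Set.add r q) (PySem.Set.add result p))
        PySem.Set.empty

def get_all_prerequisites (node : String) (matrix : List (String × List String)) : List String :=
  pvCloA matrix (matrix.length + 1) node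

-- ===== PORT B =====
-- literal transliteration of Source B's while-loop: worklist `stack`, visited set `seen`.
-- Source B keeps the stack top at the END of its list (O(1) pop) and pushes children reversed;
-- here the same stack is kept top-FIRST, so popping is `cur :: rest` and pushing the
-- reversed children onto the end-stack is prepending them in order: `pvAdj … ++ rest`.
-- The fuel only makes the loop total in Lean and is never exhausted (each iteration pops
-- one item, and at most pvE items are ever pushed per distinct visited node)
def pvLoopB (matrix : List (String × List String)) : Nat → PySem.Set String → List String → PySem.Set String
  | 0, seen, _ => seen
  | _ + 1, seen, [] => seen
  | f + 1, seen, cur :: rest =>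
    if cur ∈ seen then pvLoopB matrix f seen rest
    else pvLoopB matrix f (PySem.Set.add seen cur) (pvAdj matrix cur ++ rest)

def get_all_prerequisites_alt (node : String) (matrix : List (String × List String)) : List String :=
  pvLoopB matrix ((pvE matrix + 1) * (pvE matrix + 2) + 1) PySem.Set.empty (pvAdj matrix node)

-- ===== PRECONDITION & SPEC =====
-- one step of the reachable-set saturation used to state the precondition
def pvStep (matrix : List (String × List String)) (S : List String) : List String :=
  S ++ ((S.flatMap (pvAdj matrix)).filter (fun y => decide (y ∉ S))).dedup

def pvIter (matrix : List (String × List String)) : Nat → List String → List String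
  | 0, S => S
  | n + 1, S => pvIter matrix n (pvStep matrix S)

def pvReach (matrix : List (String × List String)) (S : List String) : List String :=
  pvIter matrix (pvE matrix + 2) S

-- Pre_ is a property of the prerequisite GRAPH alone (neither port computes reachable
-- sets): it says that no node reachable from `node` lies on a cycle, i.e. x ∉ reach⁺(x)
-- for every x in the reachable set.  Pre_ excludes exactly the inputs on which a cycle is
-- reachable from `node`: there Python A recurses forever (RecursionError) and returns no
-- value.  Reachable sets are written as edge-relation saturations (pvE+2 rounds always
-- reach the fixed point, so the fixed-point conjuncts never exclude anything; they only
-- make the sets usable in the proofs).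
def Pre_get_all_prerequisites (node : String) (matrix : List (String × List String)) : Prop :=
  pvStep matrix (pvReach matrix [node]) = pvReach matrix [node] ∧
  ∀ x ∈ pvReach matrix [node],
    pvStep matrix (pvReach matrix (pvAdj matrix x)) = pvReach matrix (pvAdj matrix x) ∧
    x ∉ pvReach matrix (pvAdj matrix x)

instance (node : String) (matrix : List (String × List String)) : Decidable (Pre_get_all_prerequisites node matrix) := by
  unfold Pre_get_all_prerequisites; infer_instance

def pvWitness_get_all_prerequisites : String × (List (String × List String)) :=
  ("a", [("a", ["b"])])

def Spec_get_all_prerequisites (node : String) (matrix : List (String × List String)) (out : List String) : Prop := out = get_all_prerequisites_alt node matrix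
instance (node : String) (matrix : List (String × List String)) (out : List String) : Decidable (Spec_get_all_prerequisites node matrix out) := by unfold Spec_get_all_prerequisites; infer_instance

-- ===== CLAIM (what is proved, stated in full; the proofs are below) =====
def Claim_equal_get_all_prerequisites : Prop := ∀ (node : String) (matrix : List (String × List String)), Dom_get_all_prerequisites node matrix → Pre_get_all_prerequisites node matrix → Spec_get_all_prerequisites node matrix (get_all_prerequisites node matrix)

-- ===== LEMMAS AND PROOFS =====

def pvVals (matrix : List (String × List String)) : List String := matrix.flatMap (fun kv => kv.2)

-- the reachability relation of the prerequisite graph (at least one edge)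
inductive pvR (matrix : List (String × List String)) : String → String → Prop
  | base {x y : String} : y ∈ pvAdj matrix x → pvR matrix x y
  | step {x y z : String} : y ∈ pvAdj matrix x → pvR matrix y z → pvR matrix x z

def pvROE (matrix : List (String × List String)) (a b : String) : Prop := a = b ∨ pvR matrix a b

-- "the exploration below x needs fewer than n levels"
inductive pvHt (matrix : List (String × List String)) : Nat → String → Prop
  | mk {n : Nat} {x : String} (h : ∀ y ∈ pvAdj matrix x, pvHt matrix n y) : pvHt matrix (n + 1) x

def pvUpd (s l : List String) : List String := l.foldl PySem.Set.add s

-- measure: distinct prerequisite values not yet in s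
def pvRem (matrix : List (String × List String)) (s : List String) : Nat :=
  ((pvVals matrix).dedup.filter (fun y => decide (y ∉ s))).length

-- canonical fuel for the idealized DFS
def pvF (matrix : List (String × List String)) (s l : List String) : Nat :=
  l.length + (pvE matrix + 1) * pvRem matrix s

-- idealized recursive DFS with visited set (proof device relating the two ports)
def pvVisit (matrix : List (String × List String)) : Nat → List String → List String → List String
  | 0, seen, _ => seen
  | _ + 1, seen, [] => seen
  | f + 1, seen, cur :: rest =>
    if cur ∈ seen then pvVisit matrix f seen rest
    else pvVisit matrix f (pvVisit matrix f (PySem.Set.add seen cur) (pvAdj matrix cur)) rest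

-- ---- pvUpd algebra ----

theorem pvUpd_nil (s : List String) : pvUpd s [] = s := rfl

theorem pvUpd_cons (s : List String) (x : String) (l : List String) :
    pvUpd s (x :: l) = pvUpd (PySem.Set.add s x) l := rfl

theorem pvUpd_append (s a b : List String) : pvUpd s (a ++ b) = pvUpd (pvUpd s a) b :=
  List.foldl_append

theorem mem_pvUpd {x : String} (s l : List String) : x ∈ pvUpd s l ↔ x ∈ s ∨ x ∈ l := by
  induction l generalizing s with
  | nil => simp [pvUpd_nil]
  | cons a l ih =>
    rw [pvUpd_cons, ih]
    simp [PySem.Set.mem_add]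
    tauto

theorem add_pvUpd (s t : List String) (y : String) :
    PySem.Set.add (pvUpd s t) y = pvUpd s (PySem.Set.add t y) := by
  by_cases h : y ∈ t
  · rw [PySem.Set.add_of_mem h, PySem.Set.add_of_mem ((mem_pvUpd s t).mpr (Or.inr h))]
  · rw [PySem.Set.add_of_not_mem h, pvUpd_append]
    rfl

theorem pvUpd_pvUpd (s t l : List String) : pvUpd s (pvUpd t l) = pvUpd (pvUpd s t) l := by
  induction l generalizing t with
  | nil => rfl
  | cons y l ih =>
    rw [pvUpd_cons, pvUpd_cons, add_pvUpd]
    exact ih _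

theorem pvUpd_dedup (s l : List String) : pvUpd s (pvUpd [] l) = pvUpd s l := by
  rw [pvUpd_pvUpd]; rfl

theorem pvUpd_of_subset {s a : List String} (h : ∀ x ∈ a, x ∈ s) : pvUpd s a = s := by
  induction a with
  | nil => rfl
  | cons x a ih =>
    rw [pvUpd_cons, PySem.Set.add_of_mem (h x (List.mem_cons_self))]
    exact ih (fun y hy => h y (List.mem_cons_of_mem _ hy))

theorem pvFlatCongr {α β : Type} {l : List α} {f g : α → List β}
    (h : ∀ a ∈ l, f a = g a) : l.flatMap f = l.flatMap g := by
  induction l with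
  | nil => rfl
  | cons a l ih =>
    simp only [List.flatMap_cons, h a List.mem_cons_self,
      ih (fun b hb => h b (List.mem_cons_of_mem _ hb))]

-- ---- port A as a dedup of its preorder stream ----

theorem cloFold (matrix : List (String × List String)) (n : Nat) :
    ∀ (l s : List String),
      l.foldl (fun result p =>
        (pvCloA matrix n p).foldl (fun r q => PySem.Set.add r q) (PySem.Set.add result p)) s
      = pvUpd s (l.flatMap fun p => p :: pvCloA matrix n p) := by
  intro l
  induction l with
  | nil => intro s; rfl
  | cons p l ih =>
    intro s
    show l.foldl _ ((pvCloA matrix n p).foldl _ (PySem.Set.add s p)) = _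
    rw [List.flatMap_cons, show (p :: pvCloA matrix n p) ++ l.flatMap _ =
      [p] ++ (pvCloA matrix n p ++ l.flatMap fun p => p :: pvCloA matrix n p) by simp]
    rw [pvUpd_append, pvUpd_append, ih]
    rfl

theorem cloA_flat (matrix : List (String × List String)) (n : Nat) (x : String) :
    pvCloA matrix (n + 1) x = pvUpd [] ((pvAdj matrix x).flatMap fun p => p :: pvCloA matrix n p) := by
  show (let pr := pvAdj matrix x; if pr = [] then PySem.Set.empty else _) = _
  by_cases h : pvAdj matrix x = []
  · simp [h, PySem.Set.empty, pvUpd_nil]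
  · simp only [h]
    exact cloFold matrix n (pvAdj matrix x) PySem.Set.empty

-- ---- heights and stabilization ----

theorem htStab {matrix : List (String × List String)} {n : Nat} {x : String}
    (h : pvHt matrix n x) : pvCloA matrix (n + 1) x = pvCloA matrix n x := by
  induction h with
  | @mk n x h ih =>
    rw [cloA_flat, cloA_flat]
    exact congrArg _ (pvFlatCongr (fun p hp => by rw [ih p hp]))

-- ---- pvAdj structure ----

theorem adj_spec (matrix : List (String × List String)) (x : String) :
    pvAdj matrix x = [] ∨ (pvAdj matrix x ∈ matrix.map Prod.snd ∧ x ∈ matrix.map Prod.fst) := by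
  induction matrix with
  | nil => left; rfl
  | cons kv t ih =>
    obtain ⟨k, v⟩ := kv
    rw [pvAdj, PySem.Dict.get?_mk_cons]
    by_cases h : k = x
    · right
      simp [h]
    · simp only [h, beq_iff_eq]
      rcases ih with h1 | ⟨h2, h3⟩
      · left; exact h1
      · right; exact ⟨List.mem_cons_of_mem _ h2, List.mem_cons_of_mem _ h3⟩

theorem mem_snd_subset {matrix : List (String × List String)} {l : List String}
    (h : l ∈ matrix.map Prod.snd) : ∀ y ∈ l, y ∈ pvVals matrix := by
  intro y hy
  simp only [List.mem_map] at h
  obtain ⟨kv, hkv, hl⟩ := h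
  exact List.mem_flatMap.mpr ⟨kv, hkv, hl ▸ hy⟩

theorem mem_snd_length_le {matrix : List (String × List String)} {l : List String}
    (h : l ∈ matrix.map Prod.snd) : l.length ≤ pvE matrix := by
  induction matrix with
  | nil => simp at h
  | cons kv t ih =>
    have he : pvE (kv :: t) = kv.2.length + pvE t := by
      simp [pvE, List.flatMap_cons]
    rcases List.mem_cons.mp h with h1 | h2
    · rw [he, h1]; omega
    · have := ih h2; omega

theorem adj_sub_vals {matrix : List (String × List String)} {x y : String}
    (h : y ∈ pvAdj matrix x) : y ∈ pvVals matrix := by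
  rcases adj_spec matrix x with h1 | ⟨h2, _⟩
  · rw [h1] at h; simp at h
  · exact mem_snd_subset h2 y h

theorem adj_len_le (matrix : List (String × List String)) (x : String) :
    (pvAdj matrix x).length ≤ pvE matrix := by
  rcases adj_spec matrix x with h1 | ⟨h2, _⟩
  · rw [h1]; simp
  · exact mem_snd_length_le h2

theorem adj_ne_keys {matrix : List (String × List String)} {x : String}
    (h : pvAdj matrix x ≠ []) : x ∈ matrix.map Prod.fst :=
  ((adj_spec matrix x).resolve_left h).2

-- ---- reachability facts ----

theorem pvR_snoc {matrix : List (String × List String)} {a b y : String}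
    (h : pvR matrix a b) (hy : y ∈ pvAdj matrix b) : pvR matrix a y := by
  induction h with
  | base h1 => exact .step h1 (.base hy)
  | step h1 _ ih => exact .step h1 (ih hy)

theorem roe_step {matrix : List (String × List String)} {a b y : String}
    (h : pvROE matrix a b) (hy : y ∈ pvAdj matrix b) : pvR matrix a y := by
  rcases h with rfl | h
  · exact .base hy
  · exact pvR_snoc h hy

theorem edge_roe_R {matrix : List (String × List String)} {x y q : String}
    (hy : y ∈ pvAdj matrix x) (h : pvROE matrix y q) : pvR matrix x q := by
  rcases h with rfl | h
  · exact .base hy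
  · exact .step hy h

-- ---- precondition consequences ----

theorem step_fixed_closed {matrix : List (String × List String)} {S : List String}
    (hfix : pvStep matrix S = S) : ∀ x ∈ S, ∀ y ∈ pvAdj matrix x, y ∈ S := by
  intro x hx y hy
  by_contra hns
  have hD : ((S.flatMap (pvAdj matrix)).filter (fun z => decide (z ∉ S))).dedup = [] := by
    have := congrArg List.length hfix
    rw [pvStep, List.length_append] at this
    exact List.eq_nil_of_length_eq_zero (by omega)
  have : y ∈ ((S.flatMap (pvAdj matrix)).filter (fun z => decide (z ∉ S))).dedup := by
    rw [List.mem_dedup, List.mem_filter]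
    exact ⟨List.mem_flatMap.mpr ⟨x, hx, hy⟩, by simpa using hns⟩
  rw [hD] at this
  simp at this

theorem subset_iter (matrix : List (String × List String)) :
    ∀ (n : Nat) (S : List String), S ⊆ pvIter matrix n S := by
  intro n
  induction n with
  | zero => intro S; exact fun _ h => h
  | succ n ih =>
    intro S a ha
    exact ih (pvStep matrix S) (List.mem_append_left _ ha)

theorem closed_reach {matrix : List (String × List String)} {T : List String}
    (Hc : ∀ u ∈ T, ∀ y ∈ pvAdj matrix u, y ∈ T) :
    ∀ {a z : String}, pvR matrix a z → (∀ w ∈ pvAdj matrix a, w ∈ T) → z ∈ T := by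
  intro a z h
  induction h with
  | base h1 => exact fun ha => ha _ h1
  | step h1 _ ih => exact fun ha => ih (Hc _ (ha _ h1))

theorem pre_acyc {node : String} {matrix : List (String × List String)}
    (hpre : Pre_get_all_prerequisites node matrix) :
    ∀ z, pvROE matrix node z → ¬ pvR matrix z z := by
  obtain ⟨h1, h2⟩ := hpre
  have hclosedC := step_fixed_closed h1
  have hnodeC : node ∈ pvReach matrix [node] :=
    subset_iter matrix _ [node] List.mem_cons_self
  intro z hz
  have hzC : z ∈ pvReach matrix [node] := by
    rcases hz with rfl | hz
    · exact hnodeC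
    · exact closed_reach hclosedC hz (hclosedC node hnodeC)
  obtain ⟨hzfix, hznot⟩ := h2 z hzC
  intro hzz
  exact hznot (closed_reach (step_fixed_closed hzfix) hzz (subset_iter matrix _ _))

theorem htAux {node : String} {matrix : List (String × List String)}
    (Hacy : ∀ z, pvROE matrix node z → ¬ pvR matrix z z) :
    ∀ (n : Nat) (A : List String), A.Nodup → A.length ≤ n →
    ∀ x, pvROE matrix node x →
      (∀ k, pvROE matrix x k → k ∈ matrix.map Prod.fst → k ∈ A) →
      pvHt matrix (n + 1) x := by
  intro n
  induction n with
  | zero =>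
    intro A _ hlen x hx hkeys
    constructor
    intro y hy
    exfalso
    have hxk : x ∈ matrix.map Prod.fst := adj_ne_keys (List.ne_nil_of_mem hy)
    have hxA : x ∈ A := hkeys x (Or.inl rfl) hxk
    have : A = [] := List.eq_nil_of_length_eq_zero (by omega)
    rw [this] at hxA
    simp at hxA
  | succ k ih =>
    intro A hnd hlen x hx hkeys
    constructor
    intro y hy
    have hxk : x ∈ matrix.map Prod.fst := adj_ne_keys (List.ne_nil_of_mem hy)
    have hxA : x ∈ A := hkeys x (Or.inl rfl) hxk
    have hApos : 1 ≤ A.length := List.length_pos_of_mem hxA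
    apply ih (A.erase x) (hnd.erase x)
      (by rw [List.length_erase_of_mem hxA]; omega)
      y (Or.inr (roe_step hx hy))
    intro kk hkk hkkeys
    have hkR : pvR matrix x kk := edge_roe_R hy hkk
    have hkA : kk ∈ A := hkeys kk (Or.inr hkR) hkkeys
    have hne : kk ≠ x := by
      intro e
      exact Hacy x hx (e ▸ hkR)
    exact (List.mem_erase_of_ne hne).mpr hkA

theorem ht_all {node : String} {matrix : List (String × List String)}
    (Hacy : ∀ z, pvROE matrix node z → ¬ pvR matrix z z) :
    ∀ x, pvROE matrix node x → pvHt matrix (matrix.length + 1) x := by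
  intro x hx
  apply htAux Hacy matrix.length ((matrix.map Prod.fst).dedup) (List.nodup_dedup _)
  · calc ((matrix.map Prod.fst).dedup).length ≤ (matrix.map Prod.fst).length :=
        (List.dedup_sublist _).length_le
      _ = matrix.length := List.length_map _
  · exact hx
  · intro k _ hk
    exact List.mem_dedup.mpr hk

-- ---- measure lemmas ----

theorem filt_le {α : Type} (l : List α) (p q : α → Bool) (h : ∀ a, q a = true → p a = true) :
    (l.filter q).length ≤ (l.filter p).length := by
  induction l with
  | nil => simp
  | cons a l ih =>
    by_cases hq : q a
    · rw [List.filter_cons_of_pos hq, List.filter_cons_of_pos (h a hq)]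
      simpa using ih
    · rw [List.filter_cons_of_neg (by simpa using hq)]
      by_cases hp : p a
      · rw [List.filter_cons_of_pos hp]
        simp
        omega
      · rw [List.filter_cons_of_neg (by simpa using hp)]
        exact ih

theorem filt_lt {α : Type} (l : List α) (p q : α → Bool) (h : ∀ a, q a = true → p a = true)
    (x : α) (hx : x ∈ l) (hpx : p x = true) (hqx : q x = false) :
    (l.filter q).length < (l.filter p).length := by
  induction l with
  | nil => simp at hx
  | cons a l ih =>
    rcases List.mem_cons.mp hx with rfl | hx'
    · rw [List.filter_cons_of_neg (by simp [hqx]), List.filter_cons_of_pos hpx]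
      have := filt_le l p q h
      simp
      omega
    · by_cases hq : q a
      · rw [List.filter_cons_of_pos hq, List.filter_cons_of_pos (h a hq)]
        simpa using ih hx'
      · rw [List.filter_cons_of_neg (by simpa using hq)]
        by_cases hp : p a
        · rw [List.filter_cons_of_pos hp]
          have := ih hx'
          simp
          omega
        · rw [List.filter_cons_of_neg (by simpa using hp)]
          exact ih hx'

theorem rem_lt {matrix : List (String × List String)} {s : List String} {x : String}
    (hx : x ∈ pvVals matrix) (hns : x ∉ s) : pvRem matrix (s ++ [x]) < pvRem matrix s := by
  apply filt_lt _ _ _ _ x (List.mem_dedup.mpr hx) (by simpa using hns) (by simp)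
  intro a ha
  simp only [decide_eq_true_eq] at ha ⊢
  intro hmem
  exact ha (List.mem_append_left _ hmem)

theorem rem_mono {matrix : List (String × List String)} {s t : List String}
    (h : s ⊆ t) : pvRem matrix t ≤ pvRem matrix s := by
  apply filt_le
  intro a ha
  simp only [decide_eq_true_eq] at ha ⊢
  exact fun hmem => ha (h hmem)

theorem rem_le (matrix : List (String × List String)) (s : List String) :
    pvRem matrix s ≤ pvE matrix :=
  le_trans (List.length_filter_le _ _) (le_trans (List.dedup_sublist _).length_le le_rfl)

-- ---- pvVisit basics ----

theorem visit_nil (matrix : List (String × List String)) (f : Nat) (s : List String) :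
    pvVisit matrix f s [] = s := by
  cases f <;> rfl

theorem visit_subset (matrix : List (String × List String)) :
    ∀ (f : Nat) (s l : List String), s ⊆ pvVisit matrix f s l := by
  intro f
  induction f with
  | zero => intro s l; exact fun _ h => h
  | succ f ih =>
    intro s l
    cases l with
    | nil => exact fun _ h => h
    | cons cur rest =>
      show s ⊆ (if cur ∈ s then _ else _)
      by_cases h : cur ∈ s
      · rw [if_pos h]; exact ih s rest
      · rw [if_neg h]
        intro a ha
        exact ih _ rest (ih _ (pvAdj matrix cur) ((PySem.Set.mem_add _ _ _).mpr (Or.inl ha)))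

-- everything in the closure of an already-finished node is already in s
theorem cloSub {matrix : List (String × List String)} {s l : List String}
    (hcl : ∀ q ∈ s, (∃ p ∈ l, pvROE matrix p q) → ∀ y ∈ pvAdj matrix q, y ∈ s) :
    ∀ (n : Nat) (x : String), x ∈ s → (∃ p ∈ l, pvROE matrix p x) →
      ∀ y ∈ pvCloA matrix n x, y ∈ s := by
  intro n
  induction n with
  | zero => intro x _ _ y hy; simp [pvCloA, PySem.Set.empty] at hy
  | succ n ih =>
    intro x hx hrx y hy
    rw [cloA_flat, mem_pvUpd] at hy
    rcases hy with hy | hy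
    · simp at hy
    · rw [List.mem_flatMap] at hy
      obtain ⟨p, hp, hyp⟩ := hy
      have hps : p ∈ s := hcl x hx hrx p hp
      rcases List.mem_cons.mp hyp with rfl | hyc
      · exact hps
      · obtain ⟨p0, hp0, hroe0⟩ := hrx
        exact ih p hps ⟨p0, hp0, Or.inr (roe_step hroe0 hp)⟩ y hyc

-- ---- the main DFS lemma: pvVisit computes A's dedupped preorder stream ----

theorem visitMain {matrix : List (String × List String)} {node : String}
    (Hacy : ∀ z, pvROE matrix node z → ¬ pvR matrix z z)
    (Hht : ∀ x, pvROE matrix node x → pvHt matrix (matrix.length + 1) x) :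
    ∀ (f : Nat) (s l : List String), pvF matrix s l ≤ f →
      (∀ p ∈ l, p ∈ pvVals matrix) → (∀ p ∈ l, pvROE matrix node p) →
      (∀ q ∈ s, (∃ p ∈ l, pvROE matrix p q) → ∀ y ∈ pvAdj matrix q, y ∈ s) →
      pvVisit matrix f s l
        = pvUpd s (l.flatMap fun p => p :: pvCloA matrix (matrix.length + 1) p) ∧
      ∀ q ∈ pvVisit matrix f s l, q ∉ s → ∀ y ∈ pvAdj matrix q, y ∈ pvVisit matrix f s l := by
  intro f
  induction f with
  | zero =>
    intro s l hf _ _ _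
    have hl : l = [] := by
      rw [pvF] at hf
      exact List.eq_nil_of_length_eq_zero (by omega)
    subst hl
    exact ⟨rfl, by intro q hq hns; exact absurd hq hns⟩
  | succ f ih =>
    intro s l hf hl hre hcl
    cases l with
    | nil => exact ⟨rfl, by intro q hq hns; exact absurd hq hns⟩
    | cons cur rest =>
      have hfv : pvVisit matrix (f + 1) s (cur :: rest)
          = if cur ∈ s then pvVisit matrix f s rest
            else pvVisit matrix f (pvVisit matrix f (PySem.Set.add s cur) (pvAdj matrix cur)) rest := rfl
      by_cases h : cur ∈ s
      · -- skip: cur already seen, and then its whole closure is already in s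
        have hstep : pvF matrix s rest ≤ f := by
          rw [pvF] at hf ⊢
          simp at hf
          omega
        obtain ⟨heq, hpost⟩ := ih s rest hstep
          (fun p hp => hl p (List.mem_cons_of_mem _ hp))
          (fun p hp => hre p (List.mem_cons_of_mem _ hp))
          (fun q hq ⟨p, hp, hroe⟩ => hcl q hq ⟨p, List.mem_cons_of_mem _ hp, hroe⟩)
        rw [hfv, if_pos h]
        constructor
        · rw [heq, List.flatMap_cons,
            show (cur :: pvCloA matrix (matrix.length + 1) cur) ++ _ =
              [cur] ++ (pvCloA matrix (matrix.length + 1) cur ++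
                rest.flatMap fun p => p :: pvCloA matrix (matrix.length + 1) p) by simp,
            pvUpd_append, pvUpd_append]
          have h1 : pvUpd s [cur] = s := by
            show PySem.Set.add s cur = s
            exact PySem.Set.add_of_mem h
          rw [h1]
          have h2 : pvUpd s (pvCloA matrix (matrix.length + 1) cur) = s :=
            pvUpd_of_subset (cloSub hcl _ cur h ⟨cur, List.mem_cons_self, Or.inl rfl⟩)
          rw [h2]
        · exact hpost
      · -- expand: visit cur then the rest
        have hcurv : cur ∈ pvVals matrix := hl cur List.mem_cons_self
        have hcurR : pvROE matrix node cur := hre cur List.mem_cons_self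
        have hs' : PySem.Set.add s cur = s ++ [cur] := PySem.Set.add_of_not_mem h
        have hremlt : pvRem matrix (PySem.Set.add s cur) < pvRem matrix s := by
          rw [hs']; exact rem_lt hcurv h
        have hadjlen := adj_len_le matrix cur
        have hremle := rem_le matrix s
        have hfuel1 : pvF matrix (PySem.Set.add s cur) (pvAdj matrix cur) ≤ f := by
          rw [pvF] at hf ⊢
          simp at hf
          have h1 : pvRem matrix (PySem.Set.add s cur) ≤ pvRem matrix s - 1 := by omega
          have h2 : 1 ≤ pvRem matrix s := by omega
          calc (pvAdj matrix cur).length + (pvE matrix + 1) * pvRem matrix (PySem.Set.add s cur)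
              ≤ pvE matrix + (pvE matrix + 1) * (pvRem matrix s - 1) := by
                have := Nat.mul_le_mul_left (pvE matrix + 1) h1
                omega
            _ ≤ f := by
                have : (pvE matrix + 1) * pvRem matrix s =
                    (pvE matrix + 1) * (pvRem matrix s - 1) + (pvE matrix + 1) := by
                  have h3 : pvRem matrix s - 1 + 1 = pvRem matrix s := by omega
                  calc (pvE matrix + 1) * pvRem matrix s
                      = (pvE matrix + 1) * (pvRem matrix s - 1 + 1) := by rw [h3]
                    _ = _ := by ring
                omega
        obtain ⟨heq1, hpost1⟩ := ih (PySem.Set.add s cur) (pvAdj matrix cur) hfuel1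
          (fun p hp => adj_sub_vals hp)
          (fun p hp => Or.inr (roe_step hcurR hp))
          (by
            intro q hq ⟨p, hp, hroe⟩ y hy
            have hRcq : pvR matrix cur q := edge_roe_R hp hroe
            rw [hs'] at hq
            rcases List.mem_append.mp hq with hq | hq
            · rw [hs']
              exact List.mem_append_left _
                (hcl q hq ⟨cur, List.mem_cons_self, Or.inr hRcq⟩ y hy)
            · exfalso
              have : q = cur := by simpa using hq
              exact Hacy cur hcurR (this ▸ hRcq))
        have hsub1 : PySem.Set.add s cur ⊆ pvVisit matrix f (PySem.Set.add s cur) (pvAdj matrix cur) :=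
          visit_subset matrix f _ _
        have hssub : s ⊆ pvVisit matrix f (PySem.Set.add s cur) (pvAdj matrix cur) := by
          intro a ha
          exact hsub1 ((PySem.Set.mem_add _ _ _).mpr (Or.inl ha))
        have hcurS1 : cur ∈ pvVisit matrix f (PySem.Set.add s cur) (pvAdj matrix cur) :=
          hsub1 ((PySem.Set.mem_add _ _ _).mpr (Or.inr rfl))
        have hadjS1 : ∀ y ∈ pvAdj matrix cur, y ∈ pvVisit matrix f (PySem.Set.add s cur) (pvAdj matrix cur) := by
          intro y hy
          rw [heq1, mem_pvUpd]
          exact Or.inr (List.mem_flatMap.mpr ⟨y, hy, List.mem_cons_self⟩)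
        have hfuel2 : pvF matrix (pvVisit matrix f (PySem.Set.add s cur) (pvAdj matrix cur)) rest ≤ f := by
          rw [pvF] at hf ⊢
          simp at hf
          have hr1 : pvRem matrix (pvVisit matrix f (PySem.Set.add s cur) (pvAdj matrix cur))
              ≤ pvRem matrix (PySem.Set.add s cur) := rem_mono hsub1
          have h1 : pvRem matrix (PySem.Set.add s cur) ≤ pvRem matrix s - 1 := by omega
          have h2 : 1 ≤ pvRem matrix s := by omega
          have h3 : (pvE matrix + 1) * pvRem matrix s =
              (pvE matrix + 1) * (pvRem matrix s - 1) + (pvE matrix + 1) := by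
            have h4 : pvRem matrix s - 1 + 1 = pvRem matrix s := by omega
            calc (pvE matrix + 1) * pvRem matrix s
                = (pvE matrix + 1) * (pvRem matrix s - 1 + 1) := by rw [h4]
              _ = _ := by ring
          have h5 := Nat.mul_le_mul_left (pvE matrix + 1)
            (le_trans hr1 h1)
          omega
        obtain ⟨heq2, hpost2⟩ := ih (pvVisit matrix f (PySem.Set.add s cur) (pvAdj matrix cur)) rest hfuel2
          (fun p hp => hl p (List.mem_cons_of_mem _ hp))
          (fun p hp => hre p (List.mem_cons_of_mem _ hp))
          (by
            intro q hq ⟨p, hp, hroe⟩ y hy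
            by_cases hq1 : q ∈ PySem.Set.add s cur
            · rcases (PySem.Set.mem_add _ _ _).mp hq1 with hq2 | rfl
              · exact hssub (hcl q hq2 ⟨p, List.mem_cons_of_mem _ hp, hroe⟩ y hy)
              · exact hadjS1 y hy
            · exact hpost1 q hq hq1 y hy)
        -- S1 equals A's partial result after processing `cur`
        have hS1eq : pvVisit matrix f (PySem.Set.add s cur) (pvAdj matrix cur)
            = pvUpd s (cur :: pvCloA matrix (matrix.length + 1) cur) := by
          rw [pvUpd_cons, PySem.Set.add_of_not_mem h, ← hs']
          have hhtcur : pvHt matrix (matrix.length + 1) cur := Hht cur hcurR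
          have hchild : ∀ p ∈ pvAdj matrix cur, pvHt matrix matrix.length p := by
            cases hhtcur with
            | mk h => exact h
          have hflat : pvCloA matrix (matrix.length + 1) cur =
              pvUpd [] ((pvAdj matrix cur).flatMap fun p => p :: pvCloA matrix (matrix.length + 1) p) := by
            rw [cloA_flat]
            exact congrArg _ (pvFlatCongr (fun p hp => by rw [htStab (hchild p hp)]))
          rw [hflat, pvUpd_dedup, heq1]
        constructor
        · rw [hfv, if_neg h, heq2, hS1eq, List.flatMap_cons,
            show (cur :: pvCloA matrix (matrix.length + 1) cur) ++ _ =
              (cur :: pvCloA matrix (matrix.length + 1) cur) ++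
                (rest.flatMap fun p => p :: pvCloA matrix (matrix.length + 1) p) by rfl,
            pvUpd_append]
        · rw [hfv, if_neg h]
          intro q hq hns y hy
          have hS1res : pvVisit matrix f (PySem.Set.add s cur) (pvAdj matrix cur)
              ⊆ pvVisit matrix f (pvVisit matrix f (PySem.Set.add s cur) (pvAdj matrix cur)) rest :=
            visit_subset matrix f _ _
          by_cases hq1 : q ∈ pvVisit matrix f (PySem.Set.add s cur) (pvAdj matrix cur)
          · by_cases hq2 : q ∈ PySem.Set.add s cur
            · rcases (PySem.Set.mem_add _ _ _).mp hq2 with hq3 | rfl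
              · exact absurd hq3 hns
              · exact hS1res (hadjS1 y hy)
            · exact hS1res (hpost1 q hq1 hq2 y hy)
          · exact hpost2 q hq hq1 y hy

-- ---- fuel irrelevance, splitting, and the loop ----

theorem visitFuel {matrix : List (String × List String)} :
    ∀ (f g : Nat) (s l : List String), pvF matrix s l ≤ f → pvF matrix s l ≤ g →
      (∀ p ∈ l, p ∈ pvVals matrix) → pvVisit matrix f s l = pvVisit matrix g s l := by
  intro f
  induction f with
  | zero =>
    intro g s l hf _ _
    have hl : l = [] := by rw [pvF] at hf; exact List.eq_nil_of_length_eq_zero (by omega)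
    subst hl
    rw [visit_nil, visit_nil]
  | succ f ih =>
    intro g s l hf hg hl
    cases l with
    | nil => rw [visit_nil, visit_nil]
    | cons cur rest =>
      have hg1 : 1 ≤ pvF matrix s (cur :: rest) := by rw [pvF]; simp; omega
      obtain ⟨g', rfl⟩ : ∃ g', g = g' + 1 := ⟨g - 1, by omega⟩
      have hfv1 : pvVisit matrix (f + 1) s (cur :: rest)
          = if cur ∈ s then pvVisit matrix f s rest
            else pvVisit matrix f (pvVisit matrix f (PySem.Set.add s cur) (pvAdj matrix cur)) rest := rfl
      have hfv2 : pvVisit matrix (g' + 1) s (cur :: rest)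
          = if cur ∈ s then pvVisit matrix g' s rest
            else pvVisit matrix g' (pvVisit matrix g' (PySem.Set.add s cur) (pvAdj matrix cur)) rest := rfl
      have hstep : pvF matrix s rest + 1 = pvF matrix s (cur :: rest) := by
        rw [pvF, pvF]; simp; omega
      by_cases h : cur ∈ s
      · rw [hfv1, hfv2, if_pos h, if_pos h]
        exact ih g' s rest (by omega) (by omega)
          (fun p hp => hl p (List.mem_cons_of_mem _ hp))
      · rw [hfv1, hfv2, if_neg h, if_neg h]
        have hcurv : cur ∈ pvVals matrix := hl cur List.mem_cons_self
        have hs' : PySem.Set.add s cur = s ++ [cur] := PySem.Set.add_of_not_mem h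
        have hremlt : pvRem matrix (PySem.Set.add s cur) < pvRem matrix s := by
          rw [hs']; exact rem_lt hcurv h
        have hadjlen := adj_len_le matrix cur
        have hb : pvF matrix (PySem.Set.add s cur) (pvAdj matrix cur) ≤ f ∧
            pvF matrix (PySem.Set.add s cur) (pvAdj matrix cur) ≤ g' := by
          rw [pvF] at hf hg ⊢
          simp at hf hg
          have h2 : 1 ≤ pvRem matrix s := by omega
          have h1 : pvRem matrix (PySem.Set.add s cur) ≤ pvRem matrix s - 1 := by omega
          have h5 := Nat.mul_le_mul_left (pvE matrix + 1) h1
          have h3 : (pvE matrix + 1) * pvRem matrix s =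
              (pvE matrix + 1) * (pvRem matrix s - 1) + (pvE matrix + 1) := by
            have h4 : pvRem matrix s - 1 + 1 = pvRem matrix s := by omega
            calc (pvE matrix + 1) * pvRem matrix s
                = (pvE matrix + 1) * (pvRem matrix s - 1 + 1) := by rw [h4]
              _ = _ := by ring
          constructor <;> omega
        have hinner : pvVisit matrix f (PySem.Set.add s cur) (pvAdj matrix cur)
            = pvVisit matrix g' (PySem.Set.add s cur) (pvAdj matrix cur) :=
          ih g' _ _ hb.1 hb.2 (fun p hp => adj_sub_vals hp)
        rw [← hinner]
        have hsub1 : PySem.Set.add s cur ⊆ pvVisit matrix f (PySem.Set.add s cur) (pvAdj matrix cur) :=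
          visit_subset matrix f _ _
        have hrS1 : pvRem matrix (pvVisit matrix f (PySem.Set.add s cur) (pvAdj matrix cur))
            ≤ pvRem matrix (PySem.Set.add s cur) := rem_mono hsub1
        have hout : pvF matrix (pvVisit matrix f (PySem.Set.add s cur) (pvAdj matrix cur)) rest ≤ f ∧
            pvF matrix (pvVisit matrix f (PySem.Set.add s cur) (pvAdj matrix cur)) rest ≤ g' := by
          rw [pvF] at hf hg ⊢
          simp at hf hg
          have h2 : 1 ≤ pvRem matrix s := by omega
          have h1 : pvRem matrix (pvVisit matrix f (PySem.Set.add s cur) (pvAdj matrix cur))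
              ≤ pvRem matrix s - 1 := by omega
          have h5 := Nat.mul_le_mul_left (pvE matrix + 1) h1
          have h3 : (pvE matrix + 1) * pvRem matrix s =
              (pvE matrix + 1) * (pvRem matrix s - 1) + (pvE matrix + 1) := by
            have h4 : pvRem matrix s - 1 + 1 = pvRem matrix s := by omega
            calc (pvE matrix + 1) * pvRem matrix s
                = (pvE matrix + 1) * (pvRem matrix s - 1 + 1) := by rw [h4]
              _ = _ := by ring
          constructor <;> omega
        exact ih g' _ rest hout.1 hout.2 (fun p hp => hl p (List.mem_cons_of_mem _ hp))

theorem visitSplit {matrix : List (String × List String)} :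
    ∀ (f : Nat) (s a b : List String) (g h' : Nat), pvF matrix s (a ++ b) ≤ f →
      (∀ p ∈ a ++ b, p ∈ pvVals matrix) →
      pvF matrix s a ≤ g → pvF matrix (pvVisit matrix g s a) b ≤ h' →
      pvVisit matrix f s (a ++ b) = pvVisit matrix h' (pvVisit matrix g s a) b := by
  intro f
  induction f with
  | zero =>
    intro s a b g h' hf hl hg hh
    have hab : a ++ b = [] := by rw [pvF] at hf; exact List.eq_nil_of_length_eq_zero (by omega)
    obtain ⟨ha, hb⟩ := List.append_eq_nil_iff.mp hab
    subst ha; subst hb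
    simp [visit_nil]
  | succ f ih =>
    intro s a b g h' hf hl hg hh
    cases a with
    | nil =>
      rw [visit_nil] at hh ⊢
      simp only [List.nil_append] at hf hl ⊢
      exact visitFuel _ _ _ _ (by omega) hh hl
    | cons x a' =>
      have hg1 : 1 ≤ pvF matrix s (x :: a') := by rw [pvF]; simp; omega
      obtain ⟨g0, rfl⟩ : ∃ g0, g = g0 + 1 := ⟨g - 1, by omega⟩
      have hfva : pvVisit matrix (g0 + 1) s (x :: a')
          = if x ∈ s then pvVisit matrix g0 s a'
            else pvVisit matrix g0 (pvVisit matrix g0 (PySem.Set.add s x) (pvAdj matrix x)) a' := rfl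
      have hfvf : pvVisit matrix (f + 1) s ((x :: a') ++ b)
          = if x ∈ s then pvVisit matrix f s (a' ++ b)
            else pvVisit matrix f (pvVisit matrix f (PySem.Set.add s x) (pvAdj matrix x)) (a' ++ b) := rfl
      by_cases h : x ∈ s
      · rw [hfvf, if_pos h]
        rw [hfva, if_pos h] at hh ⊢
        apply ih s a' b g0 h'
        · rw [pvF] at hf ⊢; simp at hf ⊢; omega
        · exact fun p hp => hl p (List.mem_cons_of_mem _ hp)
        · rw [pvF] at hg ⊢; simp at hg ⊢; omega
        · exact hh
      · rw [hfvf, if_neg h]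
        rw [hfva, if_neg h] at hh ⊢
        have hxv : x ∈ pvVals matrix := hl x List.mem_cons_self
        have hs' : PySem.Set.add s x = s ++ [x] := PySem.Set.add_of_not_mem h
        have hremlt : pvRem matrix (PySem.Set.add s x) < pvRem matrix s := by
          rw [hs']; exact rem_lt hxv h
        have hadjlen := adj_len_le matrix x
        have hF : ∀ c : List String, pvF matrix (PySem.Set.add s x) (pvAdj matrix x ++ c) ≤
            pvE matrix + c.length + (pvE matrix + 1) * (pvRem matrix s - 1) := by
          intro c
          rw [pvF]
          simp
          have h1 : pvRem matrix (PySem.Set.add s x) ≤ pvRem matrix s - 1 := by omega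
          have h5 := Nat.mul_le_mul_left (pvE matrix + 1) h1
          omega
        have harith : (pvE matrix + 1) * pvRem matrix s =
            (pvE matrix + 1) * (pvRem matrix s - 1) + (pvE matrix + 1) := by
          have h2 : 1 ≤ pvRem matrix s := by omega
          have h4 : pvRem matrix s - 1 + 1 = pvRem matrix s := by omega
          calc (pvE matrix + 1) * pvRem matrix s
              = (pvE matrix + 1) * (pvRem matrix s - 1 + 1) := by rw [h4]
            _ = _ := by ring
        have hfin : pvF matrix (PySem.Set.add s x) (pvAdj matrix x) ≤ f ∧
            pvF matrix (PySem.Set.add s x) (pvAdj matrix x) ≤ g0 := by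
          have := hF []
          rw [pvF] at hf hg
          simp at hf hg this
          constructor <;> omega
        have hinner : pvVisit matrix f (PySem.Set.add s x) (pvAdj matrix x)
            = pvVisit matrix g0 (PySem.Set.add s x) (pvAdj matrix x) :=
          visitFuel _ _ _ _ hfin.1 hfin.2 (fun p hp => adj_sub_vals hp)
        rw [hinner]
        have hsub1 : PySem.Set.add s x ⊆ pvVisit matrix g0 (PySem.Set.add s x) (pvAdj matrix x) :=
          visit_subset matrix g0 _ _
        have hrS1 : pvRem matrix (pvVisit matrix g0 (PySem.Set.add s x) (pvAdj matrix x))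
            ≤ pvRem matrix (PySem.Set.add s x) := rem_mono hsub1
        apply ih _ a' b g0 h'
        · rw [pvF] at hf ⊢
          simp at hf ⊢
          have h5 := Nat.mul_le_mul_left (pvE matrix + 1)
            (le_trans hrS1 (by omega : pvRem matrix (PySem.Set.add s x) ≤ pvRem matrix s - 1))
          omega
        · exact fun p hp => hl p (List.mem_cons_of_mem _ hp)
        · rw [pvF] at hg ⊢
          simp at hg ⊢
          have h5 := Nat.mul_le_mul_left (pvE matrix + 1)
            (le_trans hrS1 (by omega : pvRem matrix (PySem.Set.add s x) ≤ pvRem matrix s - 1))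
          omega
        · exact hh

theorem loopMain {matrix : List (String × List String)} :
    ∀ (f : Nat) (s l : List String), pvF matrix s l ≤ f →
      (∀ p ∈ l, p ∈ pvVals matrix) →
      pvLoopB matrix f s l = pvVisit matrix (pvF matrix s l) s l := by
  intro f
  induction f with
  | zero =>
    intro s l hf _
    have hl : l = [] := by rw [pvF] at hf; exact List.eq_nil_of_length_eq_zero (by omega)
    subst hl
    rw [visit_nil]; rfl
  | succ f ih =>
    intro s l hf hl
    cases l with
    | nil => rw [visit_nil]; rfl
    | cons cur rest =>
      have hg1 : 1 ≤ pvF matrix s (cur :: rest) := by rw [pvF]; simp; omega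
      obtain ⟨k, hk⟩ : ∃ k, pvF matrix s (cur :: rest) = k + 1 :=
        ⟨pvF matrix s (cur :: rest) - 1, by omega⟩
      have hfvk : pvVisit matrix (k + 1) s (cur :: rest)
          = if cur ∈ s then pvVisit matrix k s rest
            else pvVisit matrix k (pvVisit matrix k (PySem.Set.add s cur) (pvAdj matrix cur)) rest := rfl
      have hkrest : pvF matrix s rest = k := by rw [pvF] at hk ⊢; simp at hk; omega
      have hLB : pvLoopB matrix (f + 1) s (cur :: rest)
          = if cur ∈ s then pvLoopB matrix f s rest
            else pvLoopB matrix f (PySem.Set.add s cur) (pvAdj matrix cur ++ rest) := rfl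
      by_cases h : cur ∈ s
      · rw [hLB, if_pos h]
        rw [hk, hfvk, if_pos h, ih s rest (by omega)
          (fun p hp => hl p (List.mem_cons_of_mem _ hp)), hkrest]
      · rw [hLB, if_neg h]
        have hcurv : cur ∈ pvVals matrix := hl cur List.mem_cons_self
        have hs' : PySem.Set.add s cur = s ++ [cur] := PySem.Set.add_of_not_mem h
        have hremlt : pvRem matrix (PySem.Set.add s cur) < pvRem matrix s := by
          rw [hs']; exact rem_lt hcurv h
        have hadjlen := adj_len_le matrix cur
        have harith : (pvE matrix + 1) * pvRem matrix s =
            (pvE matrix + 1) * (pvRem matrix s - 1) + (pvE matrix + 1) := by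
          have h2 : 1 ≤ pvRem matrix s := by omega
          have h4 : pvRem matrix s - 1 + 1 = pvRem matrix s := by omega
          calc (pvE matrix + 1) * pvRem matrix s
              = (pvE matrix + 1) * (pvRem matrix s - 1 + 1) := by rw [h4]
            _ = _ := by ring
        have hrem1 : pvRem matrix (PySem.Set.add s cur) ≤ pvRem matrix s - 1 := by omega
        have h5 := Nat.mul_le_mul_left (pvE matrix + 1) hrem1
        have hfs : pvF matrix (PySem.Set.add s cur) (pvAdj matrix cur ++ rest) ≤ f := by
          rw [pvF] at hf ⊢
          simp at hf ⊢
          omega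
        have hlv : ∀ p ∈ pvAdj matrix cur ++ rest, p ∈ pvVals matrix := by
          intro p hp
          rcases List.mem_append.mp hp with hp | hp
          · exact adj_sub_vals hp
          · exact hl p (List.mem_cons_of_mem _ hp)
        rw [ih _ _ hfs hlv]
        rw [visitSplit (pvF matrix (PySem.Set.add s cur) (pvAdj matrix cur ++ rest))
          (PySem.Set.add s cur) (pvAdj matrix cur) rest
          (pvF matrix (PySem.Set.add s cur) (pvAdj matrix cur))
          (pvF matrix (pvVisit matrix (pvF matrix (PySem.Set.add s cur) (pvAdj matrix cur)) (PySem.Set.add s cur) (pvAdj matrix cur)) rest)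
          le_rfl hlv le_rfl le_rfl]
        rw [hk, hfvk, if_neg h]
        have hsub1k : PySem.Set.add s cur ⊆ pvVisit matrix k (PySem.Set.add s cur) (pvAdj matrix cur) :=
          visit_subset matrix k _ _
        have hinner : pvVisit matrix k (PySem.Set.add s cur) (pvAdj matrix cur)
            = pvVisit matrix (pvF matrix (PySem.Set.add s cur) (pvAdj matrix cur)) (PySem.Set.add s cur) (pvAdj matrix cur) := by
          apply visitFuel
          · rw [pvF] at hk ⊢; simp at hk; omega
          · exact le_rfl
          · exact fun p hp => adj_sub_vals hp
        rw [← hinner]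
        apply visitFuel
        · exact le_rfl
        · have hrS1 : pvRem matrix (pvVisit matrix k (PySem.Set.add s cur) (pvAdj matrix cur))
              ≤ pvRem matrix (PySem.Set.add s cur) := rem_mono hsub1k
          have h6 := Nat.mul_le_mul_left (pvE matrix + 1) (le_trans hrS1 hrem1)
          rw [pvF] at hk ⊢
          simp at hk ⊢
          omega
        · exact fun p hp => hl p (List.mem_cons_of_mem _ hp)

-- ===== VERDICT (by name: the statement is the Claim_ definition above) =====
theorem get_all_prerequisites_spec : Claim_equal_get_all_prerequisites := by
  intro node matrix _ hpre
  unfold Spec_get_all_prerequisites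
  have Hacy := pre_acyc hpre
  have Hht := ht_all Hacy
  -- B side
  have hfB : pvF matrix [] (pvAdj matrix node) ≤ (pvE matrix + 1) * (pvE matrix + 2) + 1 := by
    have h1 := adj_len_le matrix node
    have h2 := rem_le matrix []
    rw [pvF]
    have h3 := Nat.mul_le_mul_left (pvE matrix + 1) h2
    nlinarith
  have hB : get_all_prerequisites_alt node matrix
      = pvVisit matrix (pvF matrix [] (pvAdj matrix node)) [] (pvAdj matrix node) :=
    loopMain _ _ _ hfB (fun p hp => adj_sub_vals hp)
  obtain ⟨heq, _⟩ := visitMain Hacy Hht (pvF matrix [] (pvAdj matrix node)) [] (pvAdj matrix node)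
    le_rfl (fun p hp => adj_sub_vals hp) (fun p hp => Or.inr (pvR.base hp))
    (by intro q hq; simp at hq)
  -- A side
  have hA : get_all_prerequisites node matrix
      = pvUpd [] ((pvAdj matrix node).flatMap fun p => p :: pvCloA matrix (matrix.length + 1) p) := by
    show pvCloA matrix (matrix.length + 1) node = _
    rw [cloA_flat]
    have hhtnode : pvHt matrix (matrix.length + 1) node := Hht node (Or.inl rfl)
    have hchild : ∀ p ∈ pvAdj matrix node, pvHt matrix matrix.length p := by
      cases hhtnode with
      | mk h => exact h
    exact congrArg _ (pvFlatCongr (fun p hp => by rw [htStab (hchild p hp)]))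
  rw [hA, hB, heq]
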